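-- pv_equiv track=rewrite | github.com/burkkyy/viu | csci331/l1/q1.py | convertFlatToRowWise
-- ===== SOURCE A (Python) =====
-- def convertFlatToRowWise(flat: list):
--     rows = []
--     i = 0
--     rowSize = 1
--     while i < len(flat):
--         rows.append(flat[i : i + rowSize])
--         i += rowSize
--         rowSize += 1
--     return rows
-- ===== SOURCE B (Python) =====
-- def convertFlatToRowWise(flat: list):
--     rows = []
--     current = []
--     rowSize = 1
--     for x in flat:
--         current.append(x)
--         if len(current) == rowSize:
--             rows.append(current)
--             rowSize += 1
--             current = []
--     if current:
--         rows.append(current)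
--     return rows
-- ===== Notes on version B (the rewrite author's own statement) =====
-- stated objective: alternative
-- what changed: Replaces the index/slice while-loop (repeated flat[i:i+rowSize] slicing) with a single element-by-element pass that fills a row buffer and flushes it when it reaches the target size, flushing a non-empty trailing buffer at the end.
import Mathlib
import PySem

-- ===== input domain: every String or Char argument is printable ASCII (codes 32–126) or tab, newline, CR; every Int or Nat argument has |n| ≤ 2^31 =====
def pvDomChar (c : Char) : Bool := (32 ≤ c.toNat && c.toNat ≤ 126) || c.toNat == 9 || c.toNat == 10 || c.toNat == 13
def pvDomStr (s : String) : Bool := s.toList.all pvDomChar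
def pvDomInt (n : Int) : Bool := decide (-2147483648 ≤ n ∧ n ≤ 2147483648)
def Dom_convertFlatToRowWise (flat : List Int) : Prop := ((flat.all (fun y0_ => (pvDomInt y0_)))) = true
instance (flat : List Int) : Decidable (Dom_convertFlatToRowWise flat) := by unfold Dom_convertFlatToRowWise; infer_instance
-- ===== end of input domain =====

-- B replaces A's index/slice while-loop with a single element-by-element pass
-- using a row buffer flushed at the target size (alternative decomposition, same cost).


-- ===== PORT A =====
-- while i < len(flat): rows.append(flat[i:i+rowSize]); i += rowSize; rowSize += 1
def convertFlatToRowWiseGo (flat : List Int) (rows : List (List Int)) (i rowSize : Nat)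
    (hr : 0 < rowSize) : List (List Int) :=
  if h : i < flat.length then
    convertFlatToRowWiseGo flat
      (rows ++ [PySem.List.slice flat (some (i : Int)) (some ((i : Int) + (rowSize : Int)))])
      (i + rowSize) (rowSize + 1) (Nat.succ_pos rowSize)
  else rows
termination_by flat.length - i
decreasing_by omega

def convertFlatToRowWise (flat : List Int) : List (List Int) :=
  convertFlatToRowWiseGo flat [] 0 1 Nat.one_pos

-- ===== PORT B =====
-- loop body: current.append(x); if len(current) == rowSize: flush, rowSize += 1
def convertFlatToRowWiseStep (st : List (List Int) × List Int × Nat) (x : Int) :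
    List (List Int) × List Int × Nat :=
  let cur := st.2.1 ++ [x]
  if cur.length = st.2.2 then (st.1 ++ [cur], [], st.2.2 + 1) else (st.1, cur, st.2.2)

def convertFlatToRowWise_alt (flat : List Int) : List (List Int) :=
  let s := flat.foldl convertFlatToRowWiseStep ([], [], 1)
  if s.2.1.isEmpty then s.1 else s.1 ++ [s.2.1]

-- ===== PRECONDITION & SPEC =====
def Spec_convertFlatToRowWise (flat : List Int) (out : List (List Int)) : Prop := out = convertFlatToRowWise_alt flat
instance (flat : List Int) (out : List (List Int)) : Decidable (Spec_convertFlatToRowWise flat out) := by unfold Spec_convertFlatToRowWise; infer_instance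

-- ===== CLAIM (what is proved, stated in full; the proofs are below) =====
def Claim_equal_convertFlatToRowWise : Prop := ∀ (flat : List Int), Dom_convertFlatToRowWise flat → Spec_convertFlatToRowWise flat (convertFlatToRowWise flat)

-- ===== LEMMAS AND PROOFS =====

-- A's loop rewritten on the remaining suffix of the list (proof-side helper)
def goRem (rest : List Int) (rows : List (List Int)) (r : Nat) (hr : 0 < r) :
    List (List Int) :=
  if h : rest ≠ [] then
    goRem (rest.drop r) (rows ++ [rest.take r]) (r + 1) (Nat.succ_pos r)
  else rows
termination_by rest.length
decreasing_by
  simp only [List.length_drop]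
  cases rest with
  | nil => exact absurd rfl h
  | cons a t => simp; omega

lemma goA_eq_goRem (flat : List Int) :
    ∀ n i rows r (hr : 0 < r), flat.length - i ≤ n →
      convertFlatToRowWiseGo flat rows i r hr = goRem (flat.drop i) rows r hr := by
  intro n
  induction n with
  | zero =>
    intro i rows r hr hle
    rw [convertFlatToRowWiseGo, goRem]
    have : flat.length ≤ i := by omega
    simp [Nat.not_lt.mpr this, List.drop_eq_nil_of_le this]
  | succ n ih =>
    intro i rows r hr hle
    rw [convertFlatToRowWiseGo, goRem]
    by_cases h : i < flat.length
    · have hne : flat.drop i ≠ [] := by simp; omega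
      rw [dif_pos h, dif_pos hne]
      rw [ih (i + r) _ (r + 1) (Nat.succ_pos r) (by omega)]
      rw [PySem.List.slice_natCast_add, List.drop_drop]
    · have hnil : flat.drop i = [] := List.drop_eq_nil_of_le (by omega)
      simp [h, hnil]

-- B's buffer-filling invariant: folding with a partially filled buffer
lemma fold_fill :
    ∀ (rest cur : List Int) (rows : List (List Int)) (r : Nat), cur.length < r →
      List.foldl convertFlatToRowWiseStep (rows, cur, r) rest =
        if rest.length < r - cur.length then (rows, cur ++ rest, r)
        else List.foldl convertFlatToRowWiseStep
          (rows ++ [cur ++ rest.take (r - cur.length)], [], r + 1)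
          (rest.drop (r - cur.length)) := by
  intro rest
  induction rest with
  | nil =>
    intro cur rows r h
    simp [List.foldl]
    omega
  | cons x t ih =>
    intro cur rows r h
    simp only [List.foldl]
    by_cases h1 : cur.length + 1 = r
    · have hk : r - cur.length = 1 := by omega
      have hstep : convertFlatToRowWiseStep (rows, cur, r) x = (rows ++ [cur ++ [x]], [], r + 1) := by
        simp [convertFlatToRowWiseStep, h1]
      rw [hstep]
      have hcond : ¬ ((x :: t).length < r - cur.length) := by simp [hk]
      simp [hcond, hk]
    · have h2 : cur.length + 1 < r := by omega
      have hstep : convertFlatToRowWiseStep (rows, cur, r) x = (rows, cur ++ [x], r) := by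
        simp [convertFlatToRowWiseStep]; omega
      rw [hstep, ih (cur ++ [x]) rows r (by simp; omega)]
      have hk : r - (cur ++ [x]).length = r - cur.length - 1 := by simp; omega
      have hk2 : 1 ≤ r - cur.length := by omega
      simp only [hk, List.length_cons]
      by_cases hc : t.length < r - cur.length - 1
      · rw [if_pos (by omega), if_pos (by omega)]
        simp
      · have htake : (x :: t).take (r - cur.length) = x :: t.take (r - cur.length - 1) := by
          obtain ⟨m, hm⟩ : ∃ m, r - cur.length = m + 1 := ⟨r - cur.length - 1, by omega⟩
          simp [hm]
        have hdrop : (x :: t).drop (r - cur.length) = t.drop (r - cur.length - 1) := by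
          obtain ⟨m, hm⟩ : ∃ m, r - cur.length = m + 1 := ⟨r - cur.length - 1, by omega⟩
          simp [hm]
        rw [if_neg (by omega), if_neg (by omega), htake, hdrop]
        simp

def finishB (s : List (List Int) × List Int × Nat) : List (List Int) :=
  if s.2.1.isEmpty then s.1 else s.1 ++ [s.2.1]

lemma fold_eq_goRem :
    ∀ (n : Nat) (rest : List Int) (rows : List (List Int)) (r : Nat) (hr : 0 < r),
      rest.length ≤ n →
      finishB (List.foldl convertFlatToRowWiseStep (rows, [], r) rest) = goRem rest rows r hr := by
  intro n
  induction n with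
  | zero =>
    intro rest rows r hr hle
    have : rest = [] := List.eq_nil_of_length_eq_zero (by omega)
    subst this
    rw [goRem]
    simp [finishB]
  | succ n ih =>
    intro rest rows r hr hle
    cases hrest : rest with
    | nil => rw [goRem]; simp [finishB]
    | cons x t =>
      rw [← hrest, goRem]
      have hne : rest ≠ [] := by simp [hrest]
      rw [dif_pos hne]
      rw [fold_fill rest [] rows r (by simpa using hr)]
      simp only [List.length_nil, Nat.sub_zero, List.nil_append]
      by_cases hc : rest.length < r
      · have hdrop : rest.drop r = [] := List.drop_eq_nil_of_le (by omega)
        have htake : rest.take r = rest := List.take_of_length_le (by omega)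
        rw [if_pos hc, hdrop, htake, goRem]
        have : rest.isEmpty = false := by simp [hrest]
        simp [finishB, this]
      · rw [if_neg hc]
        exact ih (rest.drop r) _ (r + 1) (Nat.succ_pos r) (by simp only [List.length_drop]; omega)

-- ===== VERDICT (by name: the statement is the Claim_ definition above) =====
theorem convertFlatToRowWise_spec : Claim_equal_convertFlatToRowWise := by
  intro flat _
  unfold Spec_convertFlatToRowWise convertFlatToRowWise convertFlatToRowWise_alt
  rw [goA_eq_goRem flat flat.length 0 [] 1 Nat.one_pos (by omega)]
  rw [show List.drop 0 flat = flat from rfl]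
  rw [← fold_eq_goRem flat.length flat [] 1 Nat.one_pos le_rfl]
  rfl
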